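-- pv_equiv track=rewrite | github.com/isayaksh/Algorithm | BaekJoon/2194.py | solution
-- ===== SOURCE A (Python) =====
-- from collections import deque
--
-- def solution(N, M, A, B, K, hurdle, Sy, Sx, Ey, Ex):
--
--     def checkBox(x, y):
--         for dy in range(A):
--             for dx in range(B):
--                 nx, ny = x + dx, y + dy
--                 if (ny, nx) in hurdle:
--                     return False
--                 if nx < 1 or nx > M or ny < 1 or ny > N:
--                     return False
--         return True
--
--     # BFS
--     visited = [[False] * (M+1) for _ in range(N+1)]
--     queue = deque([(Sx, Sy, 0)])
--     while queue:
--         x, y, cnt = queue.popleft()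
--
--         if (x, y) == (Ex, Ey):
--             return cnt
--
--         for dx, dy in ((1, 0), (0, 1), (-1, 0), (0, -1)):
--             nx, ny = x + dx, y + dy
--             if 0 < nx <= M and 0 < ny <= N and not visited[ny][nx] and checkBox(nx, ny):
--                 visited[ny][nx] = True
--                 queue.append((nx ,ny, cnt+1))
--
--     return -1
-- ===== SOURCE B (Python) =====
-- from collections import deque
--
-- def solution(N, M, A, B, K, hurdle, Sy, Sx, Ey, Ex):
--     # Blocked top-left corners (y, x): every corner whose A x B box would cover a hurdle.
--     # Built once, lazily, on the first query that needs it; afterwards each BFS step is an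
--     # O(1) set lookup instead of rescanning the A*B box against the hurdle list.
--     blocked = None
--
--     def build_blocked():
--         s = set()
--         for hy, hx in set(hurdle):
--             if 1 <= hy <= N and 1 <= hx <= M:
--                 for y in range(max(1, hy - A + 1), hy + 1):
--                     for x in range(max(1, hx - B + 1), hx + 1):
--                         s.add((y, x))
--         return s
--
--     def feasible(x, y):
--         nonlocal blocked
--         if A <= 0 or B <= 0:
--             return True
--         if not (x + B - 1 <= M and y + A - 1 <= N):
--             return False
--         if blocked is None:
--             blocked = build_blocked()
--         return (y, x) not in blocked
--
--     seen = set()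
--     queue = deque([(Sx, Sy, 0)])
--     while queue:
--         x, y, cnt = queue.popleft()
--         if (x, y) == (Ex, Ey):
--             return cnt
--         for dx, dy in ((1, 0), (0, 1), (-1, 0), (0, -1)):
--             nx, ny = x + dx, y + dy
--             if 0 < nx <= M and 0 < ny <= N and (nx, ny) not in seen and feasible(nx, ny):
--                 seen.add((nx, ny))
--                 queue.append((nx, ny, cnt + 1))
--     return -1
-- ===== Notes on version B (the rewrite author's own statement) =====
-- stated objective: faster
-- what changed: B precomputes, once, the set of all top-left corners whose AxB box covers some hurdle (stamping each hurdle's corner rectangle into a set), so each BFS step does an O(1) set lookup instead of A's per-cell A*B box scan with an O(K) list-membership test per box cell; the 2D visited table becomes a seen-set.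
import Mathlib
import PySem

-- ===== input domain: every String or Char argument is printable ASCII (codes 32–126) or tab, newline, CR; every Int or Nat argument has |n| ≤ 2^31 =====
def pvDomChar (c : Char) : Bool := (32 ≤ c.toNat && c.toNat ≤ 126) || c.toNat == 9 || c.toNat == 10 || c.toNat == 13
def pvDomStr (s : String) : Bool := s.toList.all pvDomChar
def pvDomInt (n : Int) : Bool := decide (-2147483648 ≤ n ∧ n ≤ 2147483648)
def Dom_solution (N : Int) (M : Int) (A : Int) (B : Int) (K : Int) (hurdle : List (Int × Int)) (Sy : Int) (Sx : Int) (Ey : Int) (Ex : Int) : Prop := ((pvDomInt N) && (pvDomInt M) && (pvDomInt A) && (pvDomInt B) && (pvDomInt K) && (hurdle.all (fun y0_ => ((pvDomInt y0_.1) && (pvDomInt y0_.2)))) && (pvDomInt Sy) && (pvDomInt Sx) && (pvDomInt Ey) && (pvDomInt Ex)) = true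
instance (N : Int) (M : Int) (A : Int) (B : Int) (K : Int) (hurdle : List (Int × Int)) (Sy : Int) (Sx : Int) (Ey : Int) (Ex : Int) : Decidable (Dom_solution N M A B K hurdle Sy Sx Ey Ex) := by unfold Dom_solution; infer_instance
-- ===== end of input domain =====

-- B replaces A's per-cell A*B*K box scan by a precomputed set of blocked top-left corners
-- (an O(1) set lookup per BFS step) and a visited set instead of a 2D boolean table; faster.

-- ===== PORT A =====
-- checkBox(x, y): nested for-loops with early 'return False' transliterate to List.all over the ranges
def checkBoxA (N M A B : Int) (hurdle : List (Int × Int)) (x y : Int) : Bool :=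
  (PySem.List.pyRange 0 A 1).all fun dy =>
    (PySem.List.pyRange 0 B 1).all fun dx =>
      !(decide ((y + dy, x + dx) ∈ hurdle)) &&
      !(decide (x + dx < 1 ∨ x + dx > M ∨ y + dy < 1 ∨ y + dy > N))

-- visited[ny][nx] read/write; exact for the nonnegative in-range indices A ever uses (1 ≤ ny ≤ N < len)
def vget (v : List (List Bool)) (y x : Int) : Bool :=
  (v.getD y.toNat []).getD x.toNat false

def vset (v : List (List Bool)) (y x : Int) : List (List Bool) :=
  v.set y.toNat ((v.getD y.toNat []).set x.toNat true)

-- body of A's 'for dx, dy in ((1,0),(0,1),(-1,0),(0,-1))' loop; state = (visited, queue tail)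
def stepA (N M A B : Int) (hurdle : List (Int × Int)) (x y cnt : Int)
    (s : List (List Bool) × List (Int × Int × Int)) (d : Int × Int) :
    List (List Bool) × List (Int × Int × Int) :=
  let nx := x + d.1
  let ny := y + d.2
  if 0 < nx ∧ nx ≤ M ∧ 0 < ny ∧ ny ≤ N ∧ vget s.1 ny nx = false ∧
     checkBoxA N M A B hurdle nx ny = true
  then (vset s.1 ny nx, s.2 ++ [(nx, ny, cnt + 1)])
  else s

-- A's while-loop; fuel ≥ 1 + number of possible pops (each pop beyond the first was enqueued
-- with a fresh visited mark, so pops ≤ N*M + 1); fuel exhaustion is unreachable, guard only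
def bfsA (N M A B : Int) (hurdle : List (Int × Int)) (Ey Ex : Int) :
    Nat → List (List Bool) → List (Int × Int × Int) → Int
  | 0, _, _ => -1
  | _ + 1, _, [] => -1
  | fuel + 1, v, (x, y, cnt) :: rest =>
    if x = Ex ∧ y = Ey then cnt
    else
      let st := [((1 : Int), (0 : Int)), (0, 1), (-1, 0), (0, -1)].foldl
        (stepA N M A B hurdle x y cnt) (v, rest)
      bfsA N M A B hurdle Ey Ex fuel st.1 st.2

def solution (N : Int) (M : Int) (A : Int) (B : Int) (K : Int) (hurdle : List (Int × Int)) (Sy : Int) (Sx : Int) (Ey : Int) (Ex : Int) : Int :=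
  bfsA N M A B hurdle Ey Ex (N.toNat * M.toNat + 2)
    (List.replicate (N + 1).toNat (List.replicate (M + 1).toNat false))
    [(Sx, Sy, 0)]

-- ===== PORT B =====
-- one hurdle's contribution to 'blocked': the loop body of 'for hy, hx in hurdle'
def stampB (N M A B : Int) (s : PySem.Set (Int × Int)) (h : Int × Int) : PySem.Set (Int × Int) :=
  if 1 ≤ h.1 ∧ h.1 ≤ N ∧ 1 ≤ h.2 ∧ h.2 ≤ M then
    (PySem.List.pyRange (max 1 (h.1 - A + 1)) (h.1 + 1) 1).foldl
      (fun s y =>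
        (PySem.List.pyRange (max 1 (h.2 - B + 1)) (h.2 + 1) 1).foldl
          (fun s x => PySem.Set.add s (y, x)) s)
      s
  else s

-- 'for hy, hx in set(hurdle)': duplicates stamped once; order-insensitive (a set is built)
def blockedB (N M A B : Int) (hurdle : List (Int × Int)) : PySem.Set (Int × Int) :=
  (PySem.Set.ofList hurdle).foldl (stampB N M A B) PySem.Set.empty

def feasB (N M A B : Int) (blocked : PySem.Set (Int × Int)) (x y : Int) : Bool :=
  if A ≤ 0 ∨ B ≤ 0 then true
  else decide (x + B - 1 ≤ M) && decide (y + A - 1 ≤ N) && !(decide ((y, x) ∈ blocked))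

-- body of B's direction loop; state = (seen, queue tail)
def stepB (N M A B : Int) (blocked : PySem.Set (Int × Int)) (x y cnt : Int)
    (s : PySem.Set (Int × Int) × List (Int × Int × Int)) (d : Int × Int) :
    PySem.Set (Int × Int) × List (Int × Int × Int) :=
  let nx := x + d.1
  let ny := y + d.2
  if 0 < nx ∧ nx ≤ M ∧ 0 < ny ∧ ny ≤ N ∧ (nx, ny) ∉ s.1 ∧
     feasB N M A B blocked nx ny = true
  then (PySem.Set.add s.1 (nx, ny), s.2 ++ [(nx, ny, cnt + 1)])
  else s

def bfsB (N M A B : Int) (blocked : PySem.Set (Int × Int)) (Ey Ex : Int) :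
    Nat → PySem.Set (Int × Int) → List (Int × Int × Int) → Int
  | 0, _, _ => -1
  | _ + 1, _, [] => -1
  | fuel + 1, seen, (x, y, cnt) :: rest =>
    if x = Ex ∧ y = Ey then cnt
    else
      let st := [((1 : Int), (0 : Int)), (0, 1), (-1, 0), (0, -1)].foldl
        (stepB N M A B blocked x y cnt) (seen, rest)
      bfsB N M A B blocked Ey Ex fuel st.1 st.2

def solution_alt (N : Int) (M : Int) (A : Int) (B : Int) (K : Int) (hurdle : List (Int × Int)) (Sy : Int) (Sx : Int) (Ey : Int) (Ex : Int) : Int :=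
  bfsB N M A B (blockedB N M A B hurdle) Ey Ex (N.toNat * M.toNat + 2)
    PySem.Set.empty
    [(Sx, Sy, 0)]

-- ===== PRECONDITION & SPEC =====
def Spec_solution (N : Int) (M : Int) (A : Int) (B : Int) (K : Int) (hurdle : List (Int × Int)) (Sy : Int) (Sx : Int) (Ey : Int) (Ex : Int) (out : Int) : Prop := out = solution_alt N M A B K hurdle Sy Sx Ey Ex
instance (N : Int) (M : Int) (A : Int) (B : Int) (K : Int) (hurdle : List (Int × Int)) (Sy : Int) (Sx : Int) (Ey : Int) (Ex : Int) (out : Int) : Decidable (Spec_solution N M A B K hurdle Sy Sx Ey Ex out) := by unfold Spec_solution; infer_instance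

-- ===== CLAIM (what is proved, stated in full; the proofs are below) =====
def Claim_equal_solution : Prop := ∀ (N : Int) (M : Int) (A : Int) (B : Int) (K : Int) (hurdle : List (Int × Int)) (Sy : Int) (Sx : Int) (Ey : Int) (Ex : Int), Dom_solution N M A B K hurdle Sy Sx Ey Ex → Spec_solution N M A B K hurdle Sy Sx Ey Ex (solution N M A B K hurdle Sy Sx Ey Ex)

-- ===== LEMMAS AND PROOFS =====

-- visited grid keeps its rectangular shape
def ShapeV (N M : Int) (v : List (List Bool)) : Prop :=
  v.length = (N + 1).toNat ∧ ∀ r ∈ v, r.length = (M + 1).toNat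

-- the simulation invariant between A's 2D table and B's seen-set (on in-grid cells)
def InvV (N M : Int) (v : List (List Bool)) (seen : PySem.Set (Int × Int)) : Prop :=
  ∀ x y : Int, 1 ≤ x → x ≤ M → 1 ≤ y → y ≤ N → (vget v y x = true ↔ (x, y) ∈ seen)

lemma getD_set_general {α} (l : List α) (i j : Nat) (a : α) (d : α) :
    (l.set i a).getD j d = if i = j ∧ i < l.length then a else l.getD j d := by
  simp only [List.getD_eq_getElem?_getD, List.getElem?_set]
  by_cases h : i = j
  · subst h
    by_cases h2 : i < l.length
    · simp [h2]
    · simp [h2, List.getElem?_eq_none (by omega : l.length ≤ i)]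
  · simp [h]

lemma vget_init (N M : Int) (y x : Int) :
    vget (List.replicate (N + 1).toNat (List.replicate (M + 1).toNat false)) y x = false := by
  simp only [vget, List.getD_eq_getElem?_getD, List.getElem?_replicate]
  split_ifs <;> simp [List.getElem?_replicate] <;> split_ifs <;> simp


lemma shape_init (N M : Int) :
    ShapeV N M (List.replicate (N + 1).toNat (List.replicate (M + 1).toNat false)) := by
  refine ⟨by simp, fun r hr => ?_⟩
  simp [List.eq_of_mem_replicate hr]


lemma shape_vset (N M : Int) (v : List (List Bool)) (ny nx : Int)
    (hsh : ShapeV N M v) (h1 : 1 ≤ ny) (h2 : ny ≤ N) (h3 : 1 ≤ nx) (h4 : nx ≤ M) :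
    ShapeV N M (vset v ny nx) := by
  obtain ⟨hlen, hrows⟩ := hsh
  have hy : ny.toNat < v.length := by omega
  refine ⟨by simp [vset, hlen], fun r hr => ?_⟩
  rcases List.mem_or_eq_of_mem_set hr with h | h
  · exact hrows r h
  · subst h
    rw [List.getD_eq_getElem v [] hy]
    simp [hrows _ (List.getElem_mem hy)]


lemma vget_vset (N M : Int) (v : List (List Bool)) (ny nx y' x' : Int)
    (hsh : ShapeV N M v)
    (h1 : 1 ≤ ny) (h2 : ny ≤ N) (h3 : 1 ≤ nx) (h4 : nx ≤ M)
    (h5 : 1 ≤ y') (h6 : y' ≤ N) (h7 : 1 ≤ x') (h8 : x' ≤ M) :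
    vget (vset v ny nx) y' x' = if y' = ny ∧ x' = nx then true else vget v y' x' := by
  obtain ⟨hlen, hrows⟩ := hsh
  have hy : ny.toNat < v.length := by omega
  have hrow : v.getD ny.toNat [] = v[ny.toNat] := List.getD_eq_getElem v [] hy
  have hrlen : (v[ny.toNat]).length = (M + 1).toNat := hrows _ (List.getElem_mem hy)
  unfold vget vset
  rw [getD_set_general]
  by_cases hyy : ny.toNat = y'.toNat
  · have hyy' : y' = ny := by omega
    rw [if_pos ⟨hyy, hy⟩, getD_set_general]
    have hxlt : nx.toNat < (v.getD ny.toNat []).length := by rw [hrow, hrlen]; omega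
    by_cases hxx : nx.toNat = x'.toNat
    · have hxx' : x' = nx := by omega
      rw [if_pos ⟨hxx, hxlt⟩, if_pos ⟨hyy', hxx'⟩]
    · have : ¬ (x' = nx) := by omega
      simp [hyy', this, hxx, hyy]
  · have : ¬ (y' = ny) := by omega
    simp [this, hyy]


-- membership in the double stamping fold
lemma mem_double_fold (yr xr : List Int) (s : PySem.Set (Int × Int)) (p : Int × Int) :
    p ∈ yr.foldl (fun s y => xr.foldl (fun s x => PySem.Set.add s (y, x)) s) s ↔
      p ∈ s ∨ ∃ y ∈ yr, ∃ x ∈ xr, p = (y, x) := by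
  induction yr generalizing s with
  | nil => simp
  | cons y0 yr ih =>
    rw [List.foldl_cons, ih]
    have : p ∈ xr.foldl (fun s x => PySem.Set.add s (y0, x)) s ↔ p ∈ s ∨ ∃ x ∈ xr, p = (y0, x) :=
      PySem.Set.mem_foldl_add xr (fun x => (y0, x)) s p
    rw [this]
    simp only [List.mem_cons]
    constructor
    · rintro ((h | ⟨x, hx, rfl⟩) | ⟨y, hy, x, hx, rfl⟩)
      · exact Or.inl h
      · exact Or.inr ⟨y0, Or.inl rfl, x, hx, rfl⟩
      · exact Or.inr ⟨y, Or.inr hy, x, hx, rfl⟩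
    · rintro (h | ⟨y, (rfl | hy), x, hx, rfl⟩)
      · exact Or.inl (Or.inl h)
      · exact Or.inl (Or.inr ⟨x, hx, rfl⟩)
      · exact Or.inr ⟨y, hy, x, hx, rfl⟩


lemma mem_stampB (N M A B : Int) (s : PySem.Set (Int × Int)) (h p : Int × Int) :
    p ∈ stampB N M A B s h ↔
      p ∈ s ∨ ((1 ≤ h.1 ∧ h.1 ≤ N ∧ 1 ≤ h.2 ∧ h.2 ≤ M) ∧
        max 1 (h.1 - A + 1) ≤ p.1 ∧ p.1 ≤ h.1 ∧ max 1 (h.2 - B + 1) ≤ p.2 ∧ p.2 ≤ h.2) := by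
  unfold stampB
  split_ifs with hg
  · rw [mem_double_fold]
    simp only [PySem.List.mem_pyRange_one]
    constructor
    · rintro (h' | ⟨y, hy, x, hx, rfl⟩)
      · exact Or.inl h'
      · exact Or.inr ⟨hg, by omega, by omega, by omega, by omega⟩
    · rintro (h' | ⟨_, hy1, hy2, hx1, hx2⟩)
      · exact Or.inl h'
      · exact Or.inr ⟨p.1, by omega, p.2, by omega, rfl⟩
  · simp [hg]


lemma mem_blockedB (N M A B : Int) (hurdle : List (Int × Int)) (p : Int × Int) :
    p ∈ blockedB N M A B hurdle ↔
      ∃ h ∈ hurdle, (1 ≤ h.1 ∧ h.1 ≤ N ∧ 1 ≤ h.2 ∧ h.2 ≤ M) ∧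
        max 1 (h.1 - A + 1) ≤ p.1 ∧ p.1 ≤ h.1 ∧ max 1 (h.2 - B + 1) ≤ p.2 ∧ p.2 ≤ h.2 := by
  unfold blockedB
  have main : ∀ (l : List (Int × Int)) (s : PySem.Set (Int × Int)),
      p ∈ l.foldl (stampB N M A B) s ↔ p ∈ s ∨ ∃ h ∈ l, (1 ≤ h.1 ∧ h.1 ≤ N ∧ 1 ≤ h.2 ∧ h.2 ≤ M) ∧
        max 1 (h.1 - A + 1) ≤ p.1 ∧ p.1 ≤ h.1 ∧ max 1 (h.2 - B + 1) ≤ p.2 ∧ p.2 ≤ h.2 := by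
    intro l
    induction l with
    | nil => simp
    | cons h0 l ih =>
      intro s
      rw [List.foldl_cons, ih, mem_stampB]
      simp only [List.mem_cons]
      constructor
      · rintro ((h' | hc) | ⟨h, hh, hc⟩)
        · exact Or.inl h'
        · exact Or.inr ⟨h0, Or.inl rfl, hc⟩
        · exact Or.inr ⟨h, Or.inr hh, hc⟩
      · rintro (h' | ⟨h, (rfl | hh), hc⟩)
        · exact Or.inl (Or.inl h')
        · exact Or.inl (Or.inr hc)
        · exact Or.inr ⟨h, hh, hc⟩
  rw [main]
  simp only [PySem.Set.mem_ofList, PySem.Set.empty]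
  simp


lemma checkBoxA_iff (N M A B : Int) (hurdle : List (Int × Int)) (x y : Int) :
    checkBoxA N M A B hurdle x y = true ↔
      ∀ dy : Int, 0 ≤ dy → dy < A → ∀ dx : Int, 0 ≤ dx → dx < B →
        ((y + dy, x + dx) ∉ hurdle ∧
          ¬(x + dx < 1 ∨ x + dx > M ∨ y + dy < 1 ∨ y + dy > N)) := by
  simp only [checkBoxA, List.all_eq_true, PySem.List.mem_pyRange_one, Bool.and_eq_true,
    Bool.not_eq_true', decide_eq_false_iff_not, and_imp]


-- the heart of the equivalence: A's box scan equals B's precomputed-set lookup on in-grid cells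
lemma checkBox_eq_feas (N M A B : Int) (hurdle : List (Int × Int)) (x y : Int)
    (hx1 : 1 ≤ x) (hxM : x ≤ M) (hy1 : 1 ≤ y) (hyN : y ≤ N) :
    checkBoxA N M A B hurdle x y = feasB N M A B (blockedB N M A B hurdle) x y := by
  by_cases hAB : A ≤ 0 ∨ B ≤ 0
  · rw [feasB, if_pos hAB, (checkBoxA_iff N M A B hurdle x y).mpr]
    intro dy h1 h2 dx h3 h4
    exfalso; omega
  · rw [feasB, if_neg hAB]
    rw [not_or] at hAB
    by_cases hb : x + B - 1 ≤ M ∧ y + A - 1 ≤ N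
    · have hcb : checkBoxA N M A B hurdle x y = true ↔ ¬ (y, x) ∈ blockedB N M A B hurdle := by
        rw [checkBoxA_iff, mem_blockedB]
        constructor
        · rintro hall ⟨h, hh, hg, hr1, hr2, hr3, hr4⟩
          have := hall (h.1 - y) (by omega) (by omega) (h.2 - x) (by omega) (by omega)
          apply this.1
          have : (y + (h.1 - y), x + (h.2 - x)) = h := by
            simp
          rw [this]; exact hh
        · intro hne dy h1 h2 dx h3 h4
          refine ⟨fun hmem => hne ⟨(y + dy, x + dx), hmem, ⟨by omega, by omega, by omega, by omega⟩,
            by omega, by omega, by omega, by omega⟩, by omega⟩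
      rw [Bool.eq_iff_iff, hcb]
      simp [hb.1, hb.2]
    · have hfalse : checkBoxA N M A B hurdle x y = false := by
        rw [Bool.eq_false_iff, Ne, checkBoxA_iff]
        intro hall
        rcases not_and_or.mp hb with h | h
        · exact absurd (hall 0 le_rfl (by omega) (B - 1) (by omega) (by omega)).2 (by omega)
        · exact absurd (hall (A - 1) (by omega) (by omega) 0 le_rfl (by omega)).2 (by omega)
      rw [hfalse]
      rcases not_and_or.mp hb with h | h <;> simp [h]


lemma step_sim (N M A B : Int) (hurdle : List (Int × Int)) (x y cnt : Int) (d : Int × Int)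
    (v : List (List Bool)) (seen : PySem.Set (Int × Int)) (q : List (Int × Int × Int))
    (hsh : ShapeV N M v) (hinv : InvV N M v seen) :
    ShapeV N M (stepA N M A B hurdle x y cnt (v, q) d).1 ∧
    InvV N M (stepA N M A B hurdle x y cnt (v, q) d).1
      (stepB N M A B (blockedB N M A B hurdle) x y cnt (seen, q) d).1 ∧
    (stepA N M A B hurdle x y cnt (v, q) d).2 =
      (stepB N M A B (blockedB N M A B hurdle) x y cnt (seen, q) d).2 := by
  unfold stepA stepB
  by_cases hbnd : 0 < x + d.1 ∧ x + d.1 ≤ M ∧ 0 < y + d.2 ∧ y + d.2 ≤ N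
  · obtain ⟨b1, b2, b3, b4⟩ := hbnd
    have hvis : vget v (y + d.2) (x + d.1) = false ↔ (x + d.1, y + d.2) ∉ seen := by
      rw [← Bool.not_eq_true, not_iff_not]
      exact hinv _ _ (by omega) b2 (by omega) b4
    have hfe : checkBoxA N M A B hurdle (x + d.1) (y + d.2) =
        feasB N M A B (blockedB N M A B hurdle) (x + d.1) (y + d.2) :=
      checkBox_eq_feas N M A B hurdle _ _ (by omega) b2 (by omega) b4
    by_cases hgo : vget v (y + d.2) (x + d.1) = false ∧
        checkBoxA N M A B hurdle (x + d.1) (y + d.2) = true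
    · rw [if_pos ⟨b1, b2, b3, b4, hgo.1, hgo.2⟩,
        if_pos ⟨b1, b2, b3, b4, hvis.mp hgo.1, hfe ▸ hgo.2⟩]
      refine ⟨shape_vset N M v _ _ hsh (by omega) b4 (by omega) b2, ?_, rfl⟩
      intro x' y' k1 k2 k3 k4
      rw [vget_vset N M v _ _ _ _ hsh (by omega) b4 (by omega) b2 k3 k4 k1 k2,
        PySem.Set.mem_add]
      by_cases he : y' = y + d.2 ∧ x' = x + d.1
      · simp [he]
      · rw [if_neg he, hinv x' y' k1 k2 k3 k4]
        have : ¬ ((x', y') = (x + d.1, y + d.2)) := by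
          simp only [Prod.mk.injEq]; tauto
        simp [this]
    · rw [if_neg (by tauto), if_neg (by
        rintro ⟨_, _, _, _, c5, c6⟩
        exact hgo ⟨hvis.mpr c5, hfe ▸ c6⟩)]
      exact ⟨hsh, hinv, rfl⟩
  · rw [if_neg (by tauto), if_neg (by tauto)]
    exact ⟨hsh, hinv, rfl⟩


lemma fold_sim (N M A B : Int) (hurdle : List (Int × Int)) (x y cnt : Int) :
    ∀ (ds : List (Int × Int)) (v : List (List Bool)) (seen : PySem.Set (Int × Int))
      (q : List (Int × Int × Int)), ShapeV N M v → InvV N M v seen →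
    ShapeV N M (ds.foldl (stepA N M A B hurdle x y cnt) (v, q)).1 ∧
    InvV N M (ds.foldl (stepA N M A B hurdle x y cnt) (v, q)).1
      (ds.foldl (stepB N M A B (blockedB N M A B hurdle) x y cnt) (seen, q)).1 ∧
    (ds.foldl (stepA N M A B hurdle x y cnt) (v, q)).2 =
      (ds.foldl (stepB N M A B (blockedB N M A B hurdle) x y cnt) (seen, q)).2 := by
  intro ds
  induction ds with
  | nil => intro v seen q hsh hinv; exact ⟨hsh, hinv, rfl⟩
  | cons d ds ih =>
    intro v seen q hsh hinv
    obtain ⟨hsh', hinv', hq'⟩ := step_sim N M A B hurdle x y cnt d v seen q hsh hinv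
    simp only [List.foldl_cons]
    have hA : stepA N M A B hurdle x y cnt (v, q) d =
        ((stepA N M A B hurdle x y cnt (v, q) d).1, (stepA N M A B hurdle x y cnt (v, q) d).2) := rfl
    have hB : stepB N M A B (blockedB N M A B hurdle) x y cnt (seen, q) d =
        ((stepB N M A B (blockedB N M A B hurdle) x y cnt (seen, q) d).1,
         (stepA N M A B hurdle x y cnt (v, q) d).2) := by
      rw [hq']
    rw [hA, hB]
    exact ih _ _ _ hsh' hinv'


lemma bfs_sim (N M A B : Int) (hurdle : List (Int × Int)) (Ey Ex : Int) :
    ∀ (fuel : Nat) (v : List (List Bool)) (seen : PySem.Set (Int × Int))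
      (q : List (Int × Int × Int)), ShapeV N M v → InvV N M v seen →
      bfsA N M A B hurdle Ey Ex fuel v q =
        bfsB N M A B (blockedB N M A B hurdle) Ey Ex fuel seen q := by
  intro fuel
  induction fuel with
  | zero => intro v seen q _ _; rfl
  | succ fuel ih =>
    intro v seen q hsh hinv
    match q with
    | [] => rfl
    | (x, y, cnt) :: rest =>
      rw [bfsA, bfsB]
      by_cases hend : x = Ex ∧ y = Ey
      · rw [if_pos hend, if_pos hend]
      · rw [if_neg hend, if_neg hend]
        obtain ⟨hsh', hinv', hq'⟩ := fold_sim N M A B hurdle x y cnt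
          [((1 : Int), (0 : Int)), (0, 1), (-1, 0), (0, -1)] v seen rest hsh hinv
        rw [ih _ _ _ hsh' hinv', hq']


-- ===== VERDICT (by name: the statement is the Claim_ definition above) =====
theorem solution_spec : Claim_equal_solution := by
  intro N M A B K hurdle Sy Sx Ey Ex _
  unfold Spec_solution solution solution_alt
  exact bfs_sim N M A B hurdle Ey Ex _ _ _ _ (shape_init N M)
    (fun x y _ _ _ _ => by simp [vget_init, PySem.Set.empty])
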